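-- pv_equiv track=rewrite | github.com/enzokpedrica/corewood | backend/app/generators/pdf_generator.py | _grupo_cabe_no_lado
-- ===== SOURCE A (Python) =====
-- def _grupo_cabe_no_lado(linhas_novas: list, linhas_existentes: list, max_linhas: int) -> bool:
--     """
--     Verifica se um grupo de linhas cabe em um lado (inferior/superior).
--
--     Args:
--         linhas_novas: linhas X do grupo a adicionar
--         linhas_existentes: linhas X já no lado
--         max_linhas: máximo de linhas permitidas (6 inferior, 4 superior)
--
--     Returns:
--         True se cabe, False se não cabe
--     """
--     # Verificar limite de linhas
--     if len(linhas_existentes) + len(linhas_novas) > max_linhas: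
--         return False
--
--     # Verificar conflito de 100mm com linhas existentes
--     for x_nova in linhas_novas:
--         for x_existente in linhas_existentes:
--             if abs(x_nova - x_existente) < 100:
--                 return False
--
--     return True
-- ===== SOURCE B (Python) =====
-- def _grupo_cabe_no_lado(linhas_novas: list, linhas_existentes: list, max_linhas: int) -> bool:
--     # Length-limit guard first, exactly as in the original.
--     if len(linhas_existentes) + len(linhas_novas) > max_linhas:
--         return False
--
--     # Sort the existing lines once; for each new line, binary-search its
--     # insertion point and only compare against the two nearest neighbours.
--     ex = sorted(linhas_existentes)
--     for x in linhas_novas: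
--         lo, hi = 0, len(ex)
--         while lo < hi:          # hand-written bisect_left (no imports)
--             mid = (lo + hi) // 2
--             if ex[mid] < x:
--                 lo = mid + 1
--             else:
--                 hi = mid
--         if lo < len(ex) and ex[lo] - x < 100:
--             return False
--         if lo > 0 and x - ex[lo - 1] < 100:
--             return False
--     return True
-- ===== Notes on version B (the rewrite author's own statement) =====
-- stated objective: alternative
-- what changed: Replaces the nested all-pairs 100mm-conflict scan by sorting the existing lines once and binary-searching each new line's insertion point, comparing only against its two nearest neighbours.
import Mathlib
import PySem

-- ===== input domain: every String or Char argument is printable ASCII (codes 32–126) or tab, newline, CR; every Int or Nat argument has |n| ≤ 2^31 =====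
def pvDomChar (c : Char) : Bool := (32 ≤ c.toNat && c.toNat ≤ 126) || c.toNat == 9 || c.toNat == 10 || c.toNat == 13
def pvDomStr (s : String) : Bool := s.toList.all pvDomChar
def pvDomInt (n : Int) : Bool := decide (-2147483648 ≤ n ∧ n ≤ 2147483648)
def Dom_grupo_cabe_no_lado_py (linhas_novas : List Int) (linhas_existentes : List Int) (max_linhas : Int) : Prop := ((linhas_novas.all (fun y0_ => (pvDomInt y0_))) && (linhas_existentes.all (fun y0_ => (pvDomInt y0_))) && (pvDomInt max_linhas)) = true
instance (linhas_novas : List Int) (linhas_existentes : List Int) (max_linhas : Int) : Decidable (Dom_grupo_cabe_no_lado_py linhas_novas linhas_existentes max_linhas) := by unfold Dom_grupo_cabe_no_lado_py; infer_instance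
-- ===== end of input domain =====

-- ===== PORT A =====
-- B sorts once and binary-searches each new line's two nearest neighbours instead of A's
-- all-pairs scan (objective: alternative algorithm, same results).
def grupo_cabe_no_lado_py (linhas_novas : List Int) (linhas_existentes : List Int) (max_linhas : Int) : Bool :=
  if (linhas_existentes.length : Int) + (linhas_novas.length : Int) > max_linhas then false
  else
    -- for x_nova in linhas_novas: for x_existente in linhas_existentes: if abs(...) < 100: return False
    linhas_novas.all (fun x_nova =>
      linhas_existentes.all (fun x_existente => !(decide (|x_nova - x_existente| < 100))))

-- ===== PORT B =====
-- the while-loop of Source B (hand-written bisect_left); mid < hi ≤ len ex at every call,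
-- so ex[mid] is always in range and getD is exact there
def pvBisect (ex : List Int) (x : Int) (lo hi : Nat) : Nat :=
  if _h : lo < hi then
    let mid := (lo + hi) / 2
    if ex.getD mid 0 < x then pvBisect ex x (mid + 1) hi else pvBisect ex x lo mid
  else lo
termination_by hi - lo
decreasing_by all_goals omega

def grupo_cabe_no_lado_py_alt (linhas_novas : List Int) (linhas_existentes : List Int) (max_linhas : Int) : Bool :=
  if (linhas_existentes.length : Int) + (linhas_novas.length : Int) > max_linhas then false
  else
    let ex := PySem.List.sorted linhas_existentes (fun v => v) false
    linhas_novas.all (fun x =>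
      let lo := pvBisect ex x 0 ex.length
      !((decide (lo < ex.length) && decide (ex.getD lo 0 - x < 100)) ||
        (decide (0 < lo) && decide (x - ex.getD (lo - 1) 0 < 100))))

-- ===== PRECONDITION & SPEC =====
def Spec_grupo_cabe_no_lado_py (linhas_novas : List Int) (linhas_existentes : List Int) (max_linhas : Int) (out : Bool) : Prop := out = grupo_cabe_no_lado_py_alt linhas_novas linhas_existentes max_linhas
instance (linhas_novas : List Int) (linhas_existentes : List Int) (max_linhas : Int) (out : Bool) : Decidable (Spec_grupo_cabe_no_lado_py linhas_novas linhas_existentes max_linhas out) := by unfold Spec_grupo_cabe_no_lado_py; infer_instance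

-- ===== CLAIM (what is proved, stated in full; the proofs are below) =====
def Claim_equal_grupo_cabe_no_lado_py : Prop := ∀ (linhas_novas : List Int) (linhas_existentes : List Int) (max_linhas : Int), Dom_grupo_cabe_no_lado_py linhas_novas linhas_existentes max_linhas → Spec_grupo_cabe_no_lado_py linhas_novas linhas_existentes max_linhas (grupo_cabe_no_lado_py linhas_novas linhas_existentes max_linhas)

-- ===== LEMMAS AND PROOFS =====

-- monotone access on a (≤)-sorted list
theorem pvGetD_mono (s : List Int) (hs : s.Pairwise (fun a b => a ≤ b))
    (i j : Nat) (hij : i ≤ j) (hj : j < s.length) :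
    s.getD i 0 ≤ s.getD j 0 := by
  rcases Nat.lt_or_ge i j with h | h
  · have hi : i < s.length := lt_of_lt_of_le h (Nat.le_of_lt_succ (Nat.lt_succ_of_lt hj)) |>.trans_le (le_refl _)
    rw [List.getD_eq_getElem s 0 (Nat.lt_trans h hj), List.getD_eq_getElem s 0 hj]
    exact (List.pairwise_iff_getElem.mp hs) i j _ _ h
  · have : i = j := Nat.le_antisymm hij h
    subst this; rfl

-- the bisect loop returns an index r with lo ≤ r ≤ hi splitting s into (< x) and (≥ x)
theorem pvBisect_spec (s : List Int) (x : Int) (hs : s.Pairwise (fun a b => a ≤ b))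
    (lo hi : Nat) (hlh : lo ≤ hi) (hh : hi ≤ s.length)
    (hlow : ∀ i, i < lo → s.getD i 0 < x)
    (hhigh : ∀ i, hi ≤ i → i < s.length → x ≤ s.getD i 0) :
    pvBisect s x lo hi ≤ hi ∧
    (∀ i, i < pvBisect s x lo hi → s.getD i 0 < x) ∧
    (∀ i, pvBisect s x lo hi ≤ i → i < s.length → x ≤ s.getD i 0) := by
  rw [pvBisect]
  split
  · rename_i h
    by_cases hm : s.getD ((lo + hi) / 2) 0 < x
    · simp only [hm, if_true]
      have hrec := pvBisect_spec s x hs ((lo + hi) / 2 + 1) hi (by omega) hh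
        (fun i hi' => lt_of_le_of_lt
          (pvGetD_mono s hs i ((lo + hi) / 2) (by omega) (by omega)) hm |>.trans_le (le_refl _))
        hhigh
      exact hrec
    · simp only [hm, if_false]
      have hrec := pvBisect_spec s x hs lo ((lo + hi) / 2) (by omega) (by omega)
        hlow
        (fun i hi1 hi2 => le_trans (not_lt.mp hm)
          (pvGetD_mono s hs ((lo + hi) / 2) i hi1 hi2))
      exact ⟨le_trans hrec.1 (by omega), hrec.2⟩
  · rename_i h
    have : lo = hi := by omega
    subst this
    exact ⟨le_refl _, hlow, hhigh⟩
termination_by hi - lo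
decreasing_by all_goals omega

-- conflict with SOME element of a sorted list ↔ conflict with one of the two bisect neighbours
theorem pvNeighbor (s : List Int) (x : Int) (hs : s.Pairwise (fun a b => a ≤ b)) :
    ((∃ e ∈ s, |x - e| < 100) ↔
      ((pvBisect s x 0 s.length < s.length ∧ s.getD (pvBisect s x 0 s.length) 0 - x < 100) ∨
       (0 < pvBisect s x 0 s.length ∧ x - s.getD (pvBisect s x 0 s.length - 1) 0 < 100))) := by
  obtain ⟨hle, hlow, hhigh⟩ := pvBisect_spec s x hs 0 s.length (Nat.zero_le _) (le_refl _)
    (fun i hi => absurd hi (Nat.not_lt_zero i)) (fun i hi1 hi2 => absurd (lt_of_le_of_lt hi1 hi2) (lt_irrefl _))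
  set r := pvBisect s x 0 s.length with hr
  constructor
  · rintro ⟨e, he, habs⟩
    obtain ⟨i, hi, rfl⟩ := List.mem_iff_getElem.mp he
    have hgetd : s.getD i 0 = s[i] := List.getD_eq_getElem s 0 hi
    rcases Nat.lt_or_ge i r with hir | hir
    · -- s[i] < x : x - s[i] < 100, and s[r-1] ≥ s[i]
      right
      have h1 : s.getD i 0 < x := hlow i hir
      have h2 : s.getD i 0 ≤ s.getD (r - 1) 0 := pvGetD_mono s hs i (r - 1) (by omega) (by omega)
      refine ⟨by omega, ?_⟩
      rw [hgetd] at h1 h2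
      rw [abs_lt] at habs
      omega
    · -- x ≤ s[i] : s[i] - x < 100, and s[r] ≤ s[i]
      left
      have h1 : x ≤ s.getD i 0 := hhigh i hir hi
      have h2 : s.getD r 0 ≤ s.getD i 0 := pvGetD_mono s hs r i hir hi
      refine ⟨lt_of_le_of_lt hir hi, ?_⟩
      rw [hgetd] at h1 h2
      rw [abs_lt] at habs
      omega
  · rintro (⟨hrl, hd⟩ | ⟨hrp, hd⟩)
    · refine ⟨s[r], List.getElem_mem hrl, ?_⟩
      have h1 : x ≤ s.getD r 0 := hhigh r (le_refl _) hrl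
      rw [List.getD_eq_getElem s 0 hrl] at h1 hd
      rw [abs_lt]; omega
    · have hrm : r - 1 < s.length := by omega
      refine ⟨s[r - 1], List.getElem_mem hrm, ?_⟩
      have h1 : s.getD (r - 1) 0 < x := hlow (r - 1) (by omega)
      rw [List.getD_eq_getElem s 0 hrm] at h1 hd
      rw [abs_lt]; omega

-- the per-x_nova bodies of the two ports agree
theorem pvInner_eq (ex : List Int) (x : Int) :
    (ex.all (fun e => !(decide (|x - e| < 100)))) =
    (let s := PySem.List.sorted ex (fun v => v) false
     let lo := pvBisect s x 0 s.length
     !((decide (lo < s.length) && decide (s.getD lo 0 - x < 100)) ||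
       (decide (0 < lo) && decide (x - s.getD (lo - 1) 0 < 100)))) := by
  set s := PySem.List.sorted ex (fun v => v) false with hsdef
  have hs : s.Pairwise (fun a b => a ≤ b) := PySem.List.sorted_pairwise ex (fun v => v)
  have hperm : s.Perm ex := PySem.List.sorted_perm ex (fun v => v) false
  have hmem : ∀ e, e ∈ s ↔ e ∈ ex := fun e => hperm.mem_iff
  have h1 : (ex.all (fun e => !(decide (|x - e| < 100))) = true) ↔ ¬ (∃ e ∈ s, |x - e| < 100) := by
    simp only [List.all_eq_true, Bool.not_eq_eq_eq_not, Bool.not_true, decide_eq_false_iff_not]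
    constructor
    · rintro h ⟨e, he, habs⟩; exact h e ((hmem e).mp he) habs
    · intro h e he habs; exact h ⟨e, (hmem e).mpr he, habs⟩
  have h2 := pvNeighbor s x hs
  set lo := pvBisect s x 0 s.length with hlo
  show (ex.all fun e => !decide (|x - e| < 100)) =
    !((decide (lo < s.length) && decide (s.getD lo 0 - x < 100)) ||
      (decide (0 < lo) && decide (x - s.getD (lo - 1) 0 < 100)))
  by_cases hx : ∃ e ∈ s, |x - e| < 100
  · have hall : (ex.all fun e => !decide (|x - e| < 100)) = false := by
      rw [← Bool.not_eq_true, h1]; exact not_not_intro hx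
    rw [hall]; symm
    rw [Bool.not_eq_false']
    simp only [Bool.or_eq_true, Bool.and_eq_true, decide_eq_true_eq]
    exact h2.mp hx
  · have hall := h1.mpr hx
    rw [hall]; symm
    rw [Bool.not_eq_true']
    have hc : ¬ (lo < s.length ∧ s.getD lo 0 - x < 100 ∨
        0 < lo ∧ x - s.getD (lo - 1) 0 < 100) := fun hcon => hx (h2.mpr hcon)
    simp only [Bool.or_eq_false_iff, Bool.and_eq_false_iff, decide_eq_false_iff_not]
    tauto

-- ===== VERDICT (by name: the statement is the Claim_ definition above) =====
theorem grupo_cabe_no_lado_py_spec : Claim_equal_grupo_cabe_no_lado_py := by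
  intro novas ex m _
  unfold Spec_grupo_cabe_no_lado_py grupo_cabe_no_lado_py grupo_cabe_no_lado_py_alt
  split
  · rfl
  · exact congrArg novas.all (funext fun x => pvInner_eq ex x)
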